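-- pv_equiv track=rewrite | github.com/cgnart/Power-Rangers-Simulation | Power Rangers Simulation/utils.py | calculate_total_stats
-- ===== SOURCE A (Python) =====
-- from typing import List, Dict, Any, Callable
-- from functools import reduce
--
-- def calculate_total_stats(characters: List[Dict]) -> Dict[str, int]:
--     """Calculate total stats using functional programming"""
--     # Use map to extract stats, then reduce to sum them
--     get_stat = lambda char, stat: char.get(stat, 0)
--
--     stats = ['health', 'attack', 'defense', 'speed']
--     totals = {}
--
--     for stat in stats:
--         stat_values = map(lambda char: get_stat(char, stat), characters)
--         totals[stat] = reduce(lambda a, b: a + b, stat_values, 0)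
--
--     return totals
-- ===== SOURCE B (Python) =====
-- def calculate_total_stats(characters):
--     """Single pass over characters accumulating all four stats at once."""
--     health = attack = defense = speed = 0
--     for char in characters:
--         health += char.get('health', 0)
--         attack += char.get('attack', 0)
--         defense += char.get('defense', 0)
--         speed += char.get('speed', 0)
--     return {'health': health, 'attack': attack, 'defense': defense, 'speed': speed}
-- ===== Notes on version B (the rewrite author's own statement) =====
-- stated objective: simpler
-- what changed: Replaces A's four map/reduce passes (one per stat, building the dict key by key) with a single loop over the characters that accumulates all four stats at once into plain variables.
import Mathlib
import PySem

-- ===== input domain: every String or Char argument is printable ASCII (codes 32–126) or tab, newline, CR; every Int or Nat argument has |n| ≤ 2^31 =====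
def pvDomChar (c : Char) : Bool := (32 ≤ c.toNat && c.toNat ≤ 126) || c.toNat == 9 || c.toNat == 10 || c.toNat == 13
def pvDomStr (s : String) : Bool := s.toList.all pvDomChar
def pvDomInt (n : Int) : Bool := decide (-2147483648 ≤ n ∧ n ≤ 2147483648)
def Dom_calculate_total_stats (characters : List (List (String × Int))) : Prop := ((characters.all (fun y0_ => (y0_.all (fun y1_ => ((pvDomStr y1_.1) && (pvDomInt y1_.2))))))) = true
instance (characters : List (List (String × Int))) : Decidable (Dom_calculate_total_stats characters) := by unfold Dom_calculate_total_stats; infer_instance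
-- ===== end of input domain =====

-- B replaces A's four map/reduce passes (one per stat) with one pass over the characters
-- accumulating all four stats at once (objective: simpler).


-- ===== PORT A =====
-- char.get(stat, 0): first-match lookup in the insertion-ordered association list
def getStat (char : List (String × Int)) (stat : String) : Int :=
  match char.find? (fun p => p.1 == stat) with
  | some p => p.2
  | none => 0

def calculate_total_stats (characters : List (List (String × Int))) : List (String × Int) :=
  (["health", "attack", "defense", "speed"].foldl
    (fun totals stat =>
      PySem.Dict.insert totals stat
        ((characters.map (fun char => getStat char stat)).foldl (fun a b => a + b) 0))
    PySem.Dict.empty).items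

-- ===== PORT B =====
def calculate_total_stats_alt (characters : List (List (String × Int))) : List (String × Int) :=
  let t := characters.foldl
    (fun (acc : Int × Int × Int × Int) char =>
      (acc.1 + getStat char "health", acc.2.1 + getStat char "attack",
       acc.2.2.1 + getStat char "defense", acc.2.2.2 + getStat char "speed"))
    (0, 0, 0, 0)
  [("health", t.1), ("attack", t.2.1), ("defense", t.2.2.1), ("speed", t.2.2.2)]

-- ===== PRECONDITION & SPEC =====
def Spec_calculate_total_stats (characters : List (List (String × Int))) (out : List (String × Int)) : Prop := out = calculate_total_stats_alt characters
instance (characters : List (List (String × Int))) (out : List (String × Int)) : Decidable (Spec_calculate_total_stats characters out) := by unfold Spec_calculate_total_stats; infer_instance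

-- ===== CLAIM (what is proved, stated in full; the proofs are below) =====
def Claim_equal_calculate_total_stats : Prop := ∀ (characters : List (List (String × Int))), Dom_calculate_total_stats characters → Spec_calculate_total_stats characters (calculate_total_stats characters)

-- ===== LEMMAS AND PROOFS =====
theorem foldl_add_shift (l : List Int) (x : Int) :
    l.foldl (fun a b => a + b) x = x + l.foldl (fun a b => a + b) 0 := by
  induction l generalizing x with
  | nil => simp
  | cons y ys ih => simp only [List.foldl_cons]; rw [ih (x + y), ih (0 + y)]; ring

theorem alt_fold_eq (characters : List (List (String × Int))) (h a d s : Int) :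
    characters.foldl
      (fun (acc : Int × Int × Int × Int) char =>
        (acc.1 + getStat char "health", acc.2.1 + getStat char "attack",
         acc.2.2.1 + getStat char "defense", acc.2.2.2 + getStat char "speed"))
      (h, a, d, s)
    = (h + (characters.map (fun c => getStat c "health")).foldl (fun x y => x + y) 0,
       a + (characters.map (fun c => getStat c "attack")).foldl (fun x y => x + y) 0,
       d + (characters.map (fun c => getStat c "defense")).foldl (fun x y => x + y) 0,
       s + (characters.map (fun c => getStat c "speed")).foldl (fun x y => x + y) 0) := by
  induction characters generalizing h a d s with
  | nil => simp
  | cons c cs ih =>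
    simp only [List.foldl_cons, List.map_cons, ih]
    rw [foldl_add_shift ((cs.map (fun c => getStat c "health"))) (0 + getStat c "health"),
        foldl_add_shift ((cs.map (fun c => getStat c "attack"))) (0 + getStat c "attack"),
        foldl_add_shift ((cs.map (fun c => getStat c "defense"))) (0 + getStat c "defense"),
        foldl_add_shift ((cs.map (fun c => getStat c "speed"))) (0 + getStat c "speed")]
    refine Prod.ext ?_ (Prod.ext ?_ (Prod.ext ?_ ?_)) <;> simp <;> ring

-- ===== VERDICT (by name: the statement is the Claim_ definition above) =====
theorem calculate_total_stats_spec : Claim_equal_calculate_total_stats := by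
  intro characters _
  unfold Spec_calculate_total_stats calculate_total_stats calculate_total_stats_alt
  rw [alt_fold_eq]
  simp [PySem.Dict.insert, PySem.Dict.empty]
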